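-- pv_equiv track=rewrite | github.com/skeletor601/BL4-SaveEditor | tools/mark_unique_effects_from_mobalytics.py | _matches_name
-- ===== SOURCE A (Python) =====
-- def _matches_name(blob_norm: str, names_norm: set[str]) -> bool:
--     for n in names_norm:
--         if len(n) <= 3:
--             if blob_norm == n:
--                 return True
--         elif n in blob_norm:
--             return True
--     return False
-- ===== SOURCE B (Python) =====
-- def _matches_name(blob_norm: str, names_norm: set[str]) -> bool:
--     # Inverted matching direction: rather than scanning the names and matching each
--     # one against the blob, enumerate the match candidates the blob itself can offer:
--     # the blob as a whole (covers every exact match, and a whole-blob hit on a long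
--     # name is also a substring hit), plus each window of the blob whose length is one
--     # of the lengths actually occurring among the long names, tested by one set lookup.
--     if blob_norm in names_norm:
--         return True
--     longs = {n for n in names_norm if len(n) > 3}
--     lens = {len(n) for n in longs}
--     m = len(blob_norm)
--     return any(blob_norm[i:i + L] in longs
--                for L in lens for i in range(m - L + 1))
-- ===== Notes on version B (the rewrite author's own statement) =====
-- stated objective: alternative
-- what changed: B inverts the matching direction: instead of scanning the names and testing each against the blob (equality for short names, substring search for long ones), it first answers with one whole-blob set lookup (which covers every exact hit), then enumerates the blob's own candidate windows at exactly the lengths occurring among the long names and tests each window by a single set-membership lookup.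
import Mathlib
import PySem

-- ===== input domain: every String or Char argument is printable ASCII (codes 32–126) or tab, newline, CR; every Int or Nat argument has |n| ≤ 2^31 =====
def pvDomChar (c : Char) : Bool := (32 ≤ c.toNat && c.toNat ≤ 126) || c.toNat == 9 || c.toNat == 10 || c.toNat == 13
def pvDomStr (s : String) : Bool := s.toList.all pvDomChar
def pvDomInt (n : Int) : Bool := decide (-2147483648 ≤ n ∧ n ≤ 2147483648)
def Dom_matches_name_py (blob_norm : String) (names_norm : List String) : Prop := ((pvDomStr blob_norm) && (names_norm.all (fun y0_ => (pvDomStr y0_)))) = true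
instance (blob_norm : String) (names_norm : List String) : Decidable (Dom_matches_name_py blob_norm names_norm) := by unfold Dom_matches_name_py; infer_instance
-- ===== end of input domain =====

-- B inverts the matching direction: instead of scanning the names and testing each against the
-- blob, it answers with one whole-blob set lookup (covering every exact hit), then slides a window
-- over the blob at exactly the lengths occurring among the long names, testing each window by one
-- set-membership lookup (objective: alternative; same asymptotic cost).

-- ===== PORT A =====
-- literal transliteration of A's single loop: branch on length, equality for short names, substring for long names
def matches_name_py (blob_norm : String) (names_norm : List String) : Bool :=
  match names_norm with
  | [] => false
  | n :: rest =>
      if PySem.Str.len n ≤ 3 then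
        if blob_norm == n then true else matches_name_py blob_norm rest
      else if PySem.Str.isIn n blob_norm then true
      else matches_name_py blob_norm rest

-- ===== PORT B =====
-- Source B: whole-blob set lookup first, then the window scan over the long-name lengths
def matches_name_py_alt (blob_norm : String) (names_norm : List String) : Bool :=
  if names_norm.contains blob_norm then true
  else
    let longs : PySem.Set String :=
      PySem.Set.ofList (names_norm.filter (fun n => 3 < PySem.Str.len n))
    let lens : PySem.Set Int := PySem.Set.ofList (longs.map PySem.Str.len)
    let m : Int := PySem.Str.len blob_norm
    lens.any (fun L => (PySem.List.pyRange 0 (m - L + 1)).any (fun i =>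
      PySem.Set.contains longs (PySem.Str.slice blob_norm (some i) (some (i + L)))))

-- ===== PRECONDITION & SPEC =====
def Spec_matches_name_py (blob_norm : String) (names_norm : List String) (out : Bool) : Prop := out = matches_name_py_alt blob_norm names_norm
instance (blob_norm : String) (names_norm : List String) (out : Bool) : Decidable (Spec_matches_name_py blob_norm names_norm out) := by unfold Spec_matches_name_py; infer_instance

-- ===== CLAIM (what is proved, stated in full; the proofs are below) =====
def Claim_equal_matches_name_py : Prop := ∀ (blob_norm : String) (names_norm : List String), Dom_matches_name_py blob_norm names_norm → Spec_matches_name_py blob_norm names_norm (matches_name_py blob_norm names_norm)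

-- ===== LEMMAS AND PROOFS =====

-- the per-name matching condition both programs decide
def NameHit (blob n : String) : Prop :=
  (n.toList.length ≤ 3 ∧ blob = n) ∨ (3 < n.toList.length ∧ n.toList <:+: blob.toList)

theorem matches_name_py_iff (blob : String) (names : List String) :
    matches_name_py blob names = true ↔ ∃ n ∈ names, NameHit blob n := by
  induction names with
  | nil => simp [matches_name_py]
  | cons n rest ih =>
    rw [matches_name_py]
    by_cases h : PySem.Str.len n ≤ 3
    · have h3 : n.toList.length ≤ 3 := by rw [PySem.Str.len_eq] at h; omega
      rw [if_pos h]
      by_cases he : blob = n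
      · rw [if_pos (by simp [he])]
        exact ⟨fun _ => ⟨n, List.mem_cons_self, Or.inl ⟨h3, he⟩⟩, fun _ => rfl⟩
      · rw [if_neg (by simpa using he), ih]
        constructor
        · rintro ⟨x, hx, hh⟩; exact ⟨x, List.mem_cons_of_mem _ hx, hh⟩
        · rintro ⟨x, hx, hh⟩
          rcases List.mem_cons.mp hx with rfl | hx
          · rcases hh with ⟨_, h'⟩ | ⟨hl, _⟩
            · exact absurd h' he
            · omega
          · exact ⟨x, hx, hh⟩
    · have h3 : 3 < n.toList.length := by rw [PySem.Str.len_eq] at h; omega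
      rw [if_neg h]
      by_cases hin : PySem.Str.isIn n blob = true
      · rw [if_pos hin]
        have hinf := (PySem.Str.isIn_iff_infix n blob).mp hin
        exact ⟨fun _ => ⟨n, List.mem_cons_self, Or.inr ⟨h3, hinf⟩⟩, fun _ => rfl⟩
      · have hnin : ¬ n.toList <:+: blob.toList := fun hc =>
          hin ((PySem.Str.isIn_iff_infix n blob).mpr hc)
        rw [if_neg hin, ih]
        constructor
        · rintro ⟨x, hx, hh⟩; exact ⟨x, List.mem_cons_of_mem _ hx, hh⟩
        · rintro ⟨x, hx, hh⟩
          rcases List.mem_cons.mp hx with rfl | hx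
          · rcases hh with ⟨hl, _⟩ | ⟨_, hi⟩
            · omega
            · exact absurd hi hnin
          · exact ⟨x, hx, hh⟩

-- membership in Source B's long-name set
theorem mem_longs (names : List String) (n : String) :
    n ∈ PySem.Set.ofList (names.filter (fun n => 3 < PySem.Str.len n)) ↔
      n ∈ names ∧ 3 < n.toList.length := by
  rw [PySem.Set.mem_ofList, List.mem_filter]
  simp only [decide_eq_true_eq, PySem.Str.len_eq]
  constructor <;> rintro ⟨h1, h2⟩ <;> exact ⟨h1, by exact_mod_cast h2⟩

theorem matches_name_py_alt_iff (blob : String) (names : List String) :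
    matches_name_py_alt blob names = true ↔ ∃ n ∈ names, NameHit blob n := by
  unfold matches_name_py_alt
  by_cases hb : names.contains blob = true
  · rw [if_pos hb]
    have hmem : blob ∈ names := List.contains_iff_mem.mp hb
    refine ⟨fun _ => ⟨blob, hmem, ?_⟩, fun _ => rfl⟩
    by_cases h3 : blob.toList.length ≤ 3
    · exact Or.inl ⟨h3, rfl⟩
    · exact Or.inr ⟨by omega, List.infix_refl _⟩
  · rw [if_neg hb]
    have hnb : blob ∉ names := fun hc => hb (List.contains_iff_mem.mpr hc)
    simp only [List.any_eq_true]
    constructor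
    · rintro ⟨L, hL, i, hi, hc⟩
      have hn := (mem_longs names _).mp (List.contains_iff_mem.mp hc)
      rw [PySem.List.mem_pyRange_one] at hi
      rw [PySem.Set.mem_ofList, List.mem_map] at hL
      obtain ⟨n0, hn0, rfl⟩ := hL
      have hl0 : 0 ≤ PySem.Str.len n0 := by rw [PySem.Str.len_eq]; omega
      have hiL : (0 : Int) ≤ i + PySem.Str.len n0 := by omega
      have hinf : (PySem.Str.slice blob (some i) (some (i + PySem.Str.len n0))).toList
          <:+: blob.toList := by
        rw [PySem.Str.toList_slice, PySem.Chars.slice_eq_listSlice,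
          PySem.List.slice_toNat _ hi.1 hiL]
        exact ((blob.toList.drop i.toNat).take_prefix _).isInfix.trans
          (blob.toList.drop_suffix i.toNat).isInfix
      exact ⟨_, hn.1, Or.inr ⟨hn.2, hinf⟩⟩
    · rintro ⟨n, hn, ⟨_, rfl⟩ | ⟨hl, hinf⟩⟩
      · exact absurd hn hnb
      · obtain ⟨s, t, hst⟩ := hinf
        have hle : s.length + n.toList.length ≤ blob.toList.length := by
          rw [← hst]; simp
        have hnlongs : n ∈ PySem.Set.ofList (names.filter (fun n => 3 < PySem.Str.len n)) :=
          (mem_longs names n).mpr ⟨hn, hl⟩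
        refine ⟨PySem.Str.len n, ?_, (s.length : Int), ?_, ?_⟩
        · rw [PySem.Set.mem_ofList, List.mem_map]
          exact ⟨n, hnlongs, rfl⟩
        · rw [PySem.List.mem_pyRange_one, PySem.Str.len_eq, PySem.Str.len_eq]
          constructor <;> [positivity; omega]
        · have heq : PySem.Str.slice blob (some (s.length : Int))
              (some ((s.length : Int) + PySem.Str.len n)) = n := by
            apply String.toList_injective
            rw [PySem.Str.len_eq, PySem.Str.toList_slice, PySem.Chars.slice_eq_listSlice,
              PySem.List.slice_natCast_add, ← hst]
            rw [List.append_assoc, List.drop_left, List.take_left]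
          rw [heq]
          exact List.contains_iff_mem.mpr hnlongs

-- ===== VERDICT (by name: the statement is the Claim_ definition above) =====
theorem matches_name_py_spec : Claim_equal_matches_name_py := by
  intro blob names _
  unfold Spec_matches_name_py
  rw [Bool.eq_iff_iff, matches_name_py_iff, matches_name_py_alt_iff]
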